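-- pv_equiv track=rewrite | github.com/Semih1997/CodingBat-Java-Problems-in-Python | Codingbat Java Array-3/QseriesUp.py | seriesUp
-- ===== SOURCE A (Python) =====
-- def seriesUp(a):
--     last_list = []
--     minus = a - 1
--     for k in range(a):
--         for i in range(a):
--             if i <= k:
--                 last_list.append(a - minus + i)
--     return last_list
-- ===== SOURCE B (Python) =====
-- def seriesUp(a):
--     result = []
--     row = []
--     for k in range(a):
--         row.append(k + 1)
--         result.extend(row)
--     return result
-- ===== Notes on version B (the rewrite author's own statement) =====
-- stated objective: alternative
-- what changed: B maintains a running prefix row (append k+1, extend result with it) instead of rescanning all of range(a) with an i<=k test for every k, eliminating the filtered inner scan.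
import Mathlib
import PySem

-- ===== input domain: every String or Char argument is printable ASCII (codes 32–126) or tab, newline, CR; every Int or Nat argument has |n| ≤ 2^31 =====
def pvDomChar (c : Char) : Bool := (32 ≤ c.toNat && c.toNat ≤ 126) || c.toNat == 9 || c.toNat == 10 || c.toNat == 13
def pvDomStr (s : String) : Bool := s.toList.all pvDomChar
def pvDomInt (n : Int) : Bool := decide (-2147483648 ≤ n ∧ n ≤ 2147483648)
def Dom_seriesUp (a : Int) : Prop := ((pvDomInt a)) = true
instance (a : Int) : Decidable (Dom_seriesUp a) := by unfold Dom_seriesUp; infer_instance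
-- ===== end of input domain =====

-- B maintains a running prefix row and extends the result with it, instead of rescanning
-- the whole range with an i<=k test for every k (objective: alternative decomposition).


-- ===== PORT A =====
def seriesUp (a : Int) : List Int :=
  let minus := a - 1
  (PySem.List.pyRange 0 a 1).foldl
    (fun last_list k =>
      (PySem.List.pyRange 0 a 1).foldl
        (fun last_list i => if i ≤ k then last_list ++ [a - minus + i] else last_list)
        last_list)
    []

-- ===== PORT B =====
def seriesUp_alt (a : Int) : List Int :=
  ((PySem.List.pyRange 0 a 1).foldl
    (fun (st : List Int × List Int) k =>
      let row := st.1 ++ [k + 1]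
      (row, st.2 ++ row))
    ([], [])).2

-- ===== PRECONDITION & SPEC =====
def Spec_seriesUp (a : Int) (out : List Int) : Prop := out = seriesUp_alt a
instance (a : Int) (out : List Int) : Decidable (Spec_seriesUp a out) := by unfold Spec_seriesUp; infer_instance

-- ===== CLAIM (what is proved, stated in full; the proofs are below) =====
def Claim_equal_seriesUp : Prop := ∀ (a : Int), Dom_seriesUp a → Spec_seriesUp a (seriesUp a)

-- ===== LEMMAS AND PROOFS =====

-- range(a) filtered by i ≤ k is range(k+1), for 0 ≤ k < a
lemma filter_pyRange_le (a k : Int) (h0 : 0 ≤ k) (h1 : k < a) :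
    (PySem.List.pyRange 0 a 1).filter (fun i => decide (i ≤ k)) = PySem.List.pyRange 0 (k + 1) 1 := by
  rw [PySem.List.pyRange_one_append 0 (k + 1) a (by omega) (by omega), List.filter_append]
  have h2 : (PySem.List.pyRange 0 (k + 1) 1).filter (fun i => decide (i ≤ k))
      = PySem.List.pyRange 0 (k + 1) 1 := by
    apply List.filter_eq_self.mpr
    intro x hx
    have := (PySem.List.mem_pyRange_one).mp hx
    simpa using (by omega : x ≤ k)
  have h3 : (PySem.List.pyRange (k + 1) a 1).filter (fun i => decide (i ≤ k)) = [] := by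
    apply List.filter_eq_nil_iff.mpr
    intro x hx
    have := (PySem.List.mem_pyRange_one).mp hx
    simpa using (by omega : ¬ x ≤ k)
  rw [h2, h3, List.append_nil]

-- A's result collapses to a flatMap of the triangular segments
lemma seriesUp_eq_flatMap (a : Int) :
    seriesUp a
      = (PySem.List.pyRange 0 a 1).flatMap
          (fun k => (PySem.List.pyRange 0 (k + 1) 1).map (fun i => i + 1)) := by
  unfold seriesUp
  have hcong : (PySem.List.pyRange 0 a 1).foldl
      (fun last_list k =>
        (PySem.List.pyRange 0 a 1).foldl
          (fun last_list i => if i ≤ k then last_list ++ [a - (a - 1) + i] else last_list)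
          last_list) []
      = (PySem.List.pyRange 0 a 1).foldl
          (fun acc k => acc ++ (PySem.List.pyRange 0 (k + 1) 1).map (fun i => i + 1)) [] := by
    apply PySem.List.foldl_congr_mem
    intro acc k hk
    have hk' := (PySem.List.mem_pyRange_one).mp hk
    rw [PySem.List.foldl_append_ite (p := fun i => i ≤ k) (f := fun i => a - (a - 1) + i),
        filter_pyRange_le a k (by omega) (by omega)]
    congr 1
    exact List.map_congr_left (fun i _ => by ring)
  rw [hcong, PySem.List.foldl_append_eq_flatMap, List.nil_append]

-- the state invariant of B's single loop, natural upper bound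
lemma alt_state_nat (n : Nat) :
    (PySem.List.pyRange 0 (n : Int) 1).foldl
      (fun (st : List Int × List Int) k =>
        let row := st.1 ++ [k + 1]
        (row, st.2 ++ row)) ([], [])
    = ((PySem.List.pyRange 0 (n : Int) 1).map (fun i => i + 1),
       (PySem.List.pyRange 0 (n : Int) 1).flatMap
         (fun k => (PySem.List.pyRange 0 (k + 1) 1).map (fun i => i + 1))) := by
  induction n with
  | zero => simp [PySem.List.pyRange_one_eq_nil]
  | succ m ih =>
    have hcast : ((m + 1 : Nat) : Int) = (m : Int) + 1 := by push_cast; ring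
    rw [hcast, PySem.List.pyRange_one_succ_right (by positivity)]
    simp only [List.foldl_append, List.foldl_cons, List.foldl_nil, ih, List.map_append,
      List.flatMap_append, List.flatMap_cons, List.flatMap_nil, List.map_cons, List.map_nil,
      List.append_nil]
    congr 1
    rw [PySem.List.pyRange_one_succ_right (show (0:Int) ≤ (m:Int) by positivity)]
    simp

lemma alt_eq_flatMap (a : Int) :
    seriesUp_alt a
      = (PySem.List.pyRange 0 a 1).flatMap
          (fun k => (PySem.List.pyRange 0 (k + 1) 1).map (fun i => i + 1)) := by
  unfold seriesUp_alt
  by_cases h : 0 ≤ a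
  · obtain ⟨n, rfl⟩ := Int.eq_ofNat_of_zero_le h
    rw [alt_state_nat n]
  · simp [PySem.List.pyRange_one_eq_nil (by omega : a ≤ 0)]

-- ===== VERDICT (by name: the statement is the Claim_ definition above) =====
theorem seriesUp_spec : Claim_equal_seriesUp := by
  intro a _
  unfold Spec_seriesUp
  rw [seriesUp_eq_flatMap, alt_eq_flatMap]
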